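-- pv_equiv track=rewrite | github.com/Jobeer1/Ubuntu-Patient-Care | Orthanc/medical-reporting-module/services/dicom_service.py | _is_valid_uid
-- ===== SOURCE A (Python) =====
-- def _is_valid_uid(uid: str) -> bool:
--     """Validate DICOM UID format"""
--     if not uid:
--         return False
--
--     # UID should contain only digits and dots
--     if not all(c.isdigit() or c == '.' for c in uid):
--         return False
--
--     # Should not start or end with dot
--     if uid.startswith('.') or uid.endswith('.'):
--         return False
--
--     # Should not have consecutive dots
--     if '..' in uid:
--         return False
--
--     # Length should be reasonable (max 64 characters)
--     if len(uid) > 64: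
--         return False
--
--     return True
-- ===== SOURCE B (Python) =====
-- def _is_valid_uid(uid: str) -> bool:
--     """Validate DICOM UID format (single pass)."""
--     if not uid or len(uid) > 64:
--         return False
--     prev_dot = True  # a dot may not be first, same as following a dot
--     for c in uid:
--         if c == '.':
--             if prev_dot:
--                 return False
--             prev_dot = True
--         elif c.isdigit():
--             prev_dot = False
--         else:
--             return False
--     return not prev_dot
-- ===== Notes on version B (the rewrite author's own statement) =====
-- stated objective: alternative
-- what changed: Fuses A's four separate scans (all(), startswith/endswith, consecutive-dot search, len) into one linear pass maintaining a prev_dot flag with early exit.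
import Mathlib
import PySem

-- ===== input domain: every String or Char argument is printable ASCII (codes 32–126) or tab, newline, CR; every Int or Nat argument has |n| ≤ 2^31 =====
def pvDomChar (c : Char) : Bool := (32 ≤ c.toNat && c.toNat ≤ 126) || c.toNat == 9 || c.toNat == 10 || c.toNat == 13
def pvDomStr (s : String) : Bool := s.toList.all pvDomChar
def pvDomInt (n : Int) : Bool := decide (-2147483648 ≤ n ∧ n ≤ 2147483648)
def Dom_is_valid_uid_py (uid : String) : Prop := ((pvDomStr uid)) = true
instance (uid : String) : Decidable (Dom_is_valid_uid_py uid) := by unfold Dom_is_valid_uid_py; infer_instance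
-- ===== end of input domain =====

-- B fuses A's four separate scans into one pass over the characters with a prev_dot flag.

-- ===== PORT A =====
def is_valid_uid_py (uid : String) : Bool :=
  if PySem.Str.len uid == 0 then false
  else if !(uid.toList.all (fun c => PySem.Chars.isdigit c || c == '.')) then false
  else if PySem.Str.startswith uid "." || PySem.Str.endswith uid "." then false
  else if PySem.Str.isIn ".." uid then false
  else if PySem.Str.len uid > 64 then false
  else true

-- ===== PORT B =====
def pvAltLoop : List Char → Bool → Bool
  | [], prevDot => !prevDot
  | c :: rest, prevDot =>
    if c == '.' then
      if prevDot then false else pvAltLoop rest true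
    else if PySem.Chars.isdigit c then pvAltLoop rest false
    else false

def is_valid_uid_py_alt (uid : String) : Bool :=
  if PySem.Str.len uid == 0 || PySem.Str.len uid > 64 then false
  else pvAltLoop uid.toList true

-- ===== PRECONDITION & SPEC =====
def Spec_is_valid_uid_py (uid : String) (out : Bool) : Prop := out = is_valid_uid_py_alt uid
instance (uid : String) (out : Bool) : Decidable (Spec_is_valid_uid_py uid out) := by unfold Spec_is_valid_uid_py; infer_instance

-- ===== CLAIM (what is proved, stated in full; the proofs are below) =====
def Claim_equal_is_valid_uid_py : Prop := ∀ (uid : String), Dom_is_valid_uid_py uid → Spec_is_valid_uid_py uid (is_valid_uid_py uid)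

-- ===== LEMMAS AND PROOFS =====

def pvGoodc (c : Char) : Bool := PySem.Chars.isdigit c || c == '.'

def pvStartsDot : List Char → Bool
  | [] => false
  | c :: _ => c == '.'

def pvEndsDot : List Char → Bool
  | [] => false
  | [c] => c == '.'
  | _ :: rest => pvEndsDot rest

def pvHasDD : List Char → Bool
  | [] => false
  | c :: rest => (c == '.' && pvStartsDot rest) || pvHasDD rest

lemma pvAltLoop_eq (l : List Char) :
    pvAltLoop l false = (l.all pvGoodc && !pvHasDD l && !pvEndsDot l)
    ∧ pvAltLoop l true =
      (!l.isEmpty && !pvStartsDot l && l.all pvGoodc && !pvHasDD l && !pvEndsDot l) := by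
  induction l with
  | nil => simp [pvAltLoop, pvHasDD, pvEndsDot, pvStartsDot]
  | cons c rest ih =>
    obtain ⟨ihf, iht⟩ := ih
    cases rest with
    | nil =>
      constructor <;>
        · cases hc : (c == '.') <;> cases hdig : PySem.Chars.isdigit c <;>
            simp_all [pvAltLoop, pvHasDD, pvEndsDot, pvStartsDot, pvGoodc]
    | cons d rest' =>
      have h1 : pvAltLoop (c :: d :: rest') false =
          if c == '.' then pvAltLoop (d :: rest') true
          else if PySem.Chars.isdigit c then pvAltLoop (d :: rest') false else false := rfl
      have h2 : pvAltLoop (c :: d :: rest') true =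
          if c == '.' then false
          else if PySem.Chars.isdigit c then pvAltLoop (d :: rest') false else false := rfl
      rw [h1, h2, ihf, iht]
      simp only [List.all_cons, pvGoodc, pvHasDD, pvStartsDot, pvEndsDot, List.isEmpty_cons]
      constructor <;>
        · cases hc : (c == '.') <;> cases hdig : PySem.Chars.isdigit c <;>
            cases hd : (d == '.') <;> cases hdig2 : PySem.Chars.isdigit d <;>
            cases hsd : pvStartsDot rest' <;> cases hdd : pvHasDD rest' <;>
            cases hend : pvEndsDot (d :: rest') <;> cases hall : rest'.all pvGoodc <;>
            simp_all

lemma pvStartsDot_eq (l : List Char) : PySem.Chars.startswith l ['.'] = pvStartsDot l := by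
  rw [Bool.eq_iff_iff, PySem.Chars.startswith_iff]
  cases l with
  | nil => simp [pvStartsDot]
  | cons c rest =>
    constructor
    · rintro ⟨t, ht⟩
      simp at ht
      simp [pvStartsDot, ht.1.symm]
    · intro h
      simp [pvStartsDot] at h
      exact ⟨rest, by simp [h]⟩

lemma pvEndsDot_eq (l : List Char) : PySem.Chars.endswith l ['.'] = pvEndsDot l := by
  rw [Bool.eq_iff_iff, PySem.Chars.endswith_iff]
  induction l with
  | nil => simp [pvEndsDot]
  | cons c rest ih =>
    cases rest with
    | nil =>
      constructor
      · intro h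
        rcases List.suffix_cons_iff.mp h with h | h
        · injection h with h' _
          subst h'
          rfl
        · simp at h
      · intro h
        simp [pvEndsDot] at h
        subst h
        exact List.suffix_refl _
    | cons d rest' =>
      rw [List.suffix_cons_iff]
      simp only [pvEndsDot]
      rw [← ih]
      simp

lemma pvHasDD_eq (l : List Char) : PySem.Chars.isIn ['.', '.'] l = pvHasDD l := by
  rw [Bool.eq_iff_iff, PySem.Chars.isIn_iff_infix]
  induction l with
  | nil => simp [pvHasDD]
  | cons c rest ih =>
    rw [List.infix_cons_iff]
    simp only [pvHasDD, Bool.or_eq_true, Bool.and_eq_true, ← ih]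
    constructor
    · rintro (⟨t, ht⟩ | h)
      · injection ht with hc hrest
        subst hc
        subst hrest
        left
        exact ⟨rfl, rfl⟩
      · right; exact h
    · rintro (⟨h1, h2⟩ | h)
      · left
        cases rest with
        | nil => simp [pvStartsDot] at h2
        | cons d r =>
          simp at h1
          simp [pvStartsDot] at h2
          exact ⟨r, by subst h1; subst h2; rfl⟩
      · right; exact h

-- ===== VERDICT (by name: the statement is the Claim_ definition above) =====
theorem is_valid_uid_py_spec : Claim_equal_is_valid_uid_py := by
  intro uid _
  show is_valid_uid_py uid = is_valid_uid_py_alt uid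
  unfold is_valid_uid_py is_valid_uid_py_alt
  simp only [PySem.Str.startswith_eq, PySem.Str.endswith_eq, PySem.Str.isIn_eq,
    PySem.Str.len_eq]
  rw [show (".").toList = ['.'] from rfl, show ("..").toList = ['.', '.'] from rfl]
  rw [pvStartsDot_eq, pvEndsDot_eq, pvHasDD_eq, (pvAltLoop_eq uid.toList).2]
  obtain ⟨l, hl⟩ : ∃ l, uid.toList = l := ⟨_, rfl⟩
  simp only [hl]
  cases l with
  | nil => simp
  | cons c rest =>
    have h0 : ((((c :: rest).length : Int)) == 0) = false := by
      simp [List.length_cons]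
      omega
    by_cases h64 : ((64 : Int) < ((c :: rest).length : Int))
    · simp only [h0, h64, decide_true, Bool.false_or, if_true, Bool.false_eq]
      split_ifs <;> rfl
    · simp only [h0, h64, decide_false, Bool.false_or, if_false,
        List.isEmpty_cons, Bool.not_false, Bool.true_and]
      have hgc : (fun c => PySem.Chars.isdigit c || c == '.') = pvGoodc := rfl
      rw [hgc]
      cases hall : (c :: rest).all pvGoodc <;>
        cases hsd : pvStartsDot (c :: rest) <;>
        cases hed : pvEndsDot (c :: rest) <;>
        cases hdd : pvHasDD (c :: rest) <;>
        simp_all
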